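-- pv_equiv track=rewrite | github.com/Abjad/abjad | abjad/tools/stringtools/to_space_delimited_lowercase.py | to_space_delimited_lowercase
-- ===== SOURCE A (Python) =====
-- def to_space_delimited_lowercase(string):
--     r'''Changes `string` to space-delimited lowercase.
--
--     ..  container:: example
--
--         Changes upper camel case `string` to space-delimited lowercase:
--
--         ::
--
--             >>> stringtools.to_space_delimited_lowercase('LogicalTie')
--             'logical tie'
--
--     ..  container:: example
--
--         Changes underscore-delimited `string` to space-delimited lowercase:
--
--         ::
--
--             >>> stringtools.to_space_delimited_lowercase('logical_tie')
--             'logical tie'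
--
--     ..  container:: example
--
--         Returns space-delimited string unchanged:
--
--         ::
--
--             >>> stringtools.to_space_delimited_lowercase('logical tie')
--             'logical tie'
--
--     ..  container:: example
--
--         Returns empty `string` unchanged:
--
--         ::
--
--             >>> stringtools.to_space_delimited_lowercase('')
--             ''
--
--     Returns string.
--     '''
--     if not string:
--         return string
--     elif string[0].isupper():
--         words = []
--         current_word = string[0].lower()
--         for letter in string[1:]:
--             if letter.isupper():
--                 words.append(current_word)
--                 current_word = letter.lower()
--             else:
--                 current_word = current_word + letter
--         words.append(current_word)
--         result = ' '.join(words)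
--         return result
--     return string.replace('_', ' ')
-- ===== SOURCE B (Python) =====
-- def to_space_delimited_lowercase(string):
--     if not string:
--         return string
--     if not string[0].isupper():
--         return string.replace('_', ' ')
--     # camelCase branch: every uppercase char starts a word, so map each char
--     # to (' ' + its lowercase) when upper, else itself, flatten, drop the
--     # leading space contributed by the first (uppercase) char.
--     return ''.join(' ' + c.lower() if c.isupper() else c for c in string)[1:]
-- ===== Notes on version B (the rewrite author's own statement) =====
-- stated objective: simpler
-- what changed: The camelCase branch's streaming loop with a words list and a current_word accumulator is replaced by a stateless per-character map (uppercase char -> ' ' + its lowercase, other chars unchanged) joined flat with the leading space sliced off.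
import Mathlib
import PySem

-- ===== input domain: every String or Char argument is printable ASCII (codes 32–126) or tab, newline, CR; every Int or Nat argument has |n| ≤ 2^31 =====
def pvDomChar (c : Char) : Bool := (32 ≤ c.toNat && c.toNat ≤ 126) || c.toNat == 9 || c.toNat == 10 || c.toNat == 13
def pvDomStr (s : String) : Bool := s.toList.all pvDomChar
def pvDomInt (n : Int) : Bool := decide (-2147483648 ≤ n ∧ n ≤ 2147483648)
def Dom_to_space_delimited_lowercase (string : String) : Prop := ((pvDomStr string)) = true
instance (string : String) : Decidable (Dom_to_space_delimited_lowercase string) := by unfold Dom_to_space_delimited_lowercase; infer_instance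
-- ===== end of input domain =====

-- B replaces A's streaming words/current_word accumulator in the camelCase branch by a
-- per-character map (upper c ↦ ' ' + lower c, else c) flattened and sliced [1:] (simpler).

-- ===== PORT A =====
-- the for-loop over string[1:] with its (words, current_word) state
def pvLoopA : List Char → List Char → List (List Char) → List (List Char)
  | [], cur, words => words ++ [cur]
  | letter :: rest, cur, words =>
    if PySem.Chars.isupper letter then
      pvLoopA rest [PySem.Chars.lowerChar letter] (words ++ [cur])
    else
      pvLoopA rest (cur ++ [letter]) words

def to_space_delimited_lowercase (string : String) : String :=
  match string.toList with
  | [] => string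
  | c :: rest =>
    if PySem.Chars.isupper c then
      String.ofList (PySem.Chars.join [' '] (pvLoopA rest [PySem.Chars.lowerChar c] []))
    else
      String.ofList (PySem.Chars.replace string.toList ['_'] [' '])

-- ===== PORT B =====
-- the per-character map of Source B's generator expression
def pvMapB (c : Char) : List Char :=
  if PySem.Chars.isupper c then [' ', PySem.Chars.lowerChar c] else [c]

def to_space_delimited_lowercase_alt (string : String) : String :=
  match string.toList with
  | [] => string
  | c :: _ =>
    if ¬ PySem.Chars.isupper c then
      String.ofList (PySem.Chars.replace string.toList ['_'] [' '])
    else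
      String.ofList (PySem.List.slice (string.toList.flatMap pvMapB) (some 1) none)

-- ===== PRECONDITION & SPEC =====
def Spec_to_space_delimited_lowercase (string : String) (out : String) : Prop := out = to_space_delimited_lowercase_alt string
instance (string : String) (out : String) : Decidable (Spec_to_space_delimited_lowercase string out) := by unfold Spec_to_space_delimited_lowercase; infer_instance

-- ===== CLAIM (what is proved, stated in full; the proofs are below) =====
def Claim_equal_to_space_delimited_lowercase : Prop := ∀ (string : String), Dom_to_space_delimited_lowercase string → Spec_to_space_delimited_lowercase string (to_space_delimited_lowercase string)

-- ===== LEMMAS AND PROOFS =====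
lemma pvLoopA_ne_nil (rest : List Char) : ∀ cur words, pvLoopA rest cur words ≠ [] := by
  induction rest with
  | nil => intro cur words; simp [pvLoopA]
  | cons c rest ih =>
    intro cur words
    simp only [pvLoopA]
    split <;> exact ih _ _

lemma pvLoopA_acc (rest : List Char) : ∀ cur words,
    pvLoopA rest cur words = words ++ pvLoopA rest cur [] := by
  induction rest with
  | nil => intro cur words; simp [pvLoopA]
  | cons c rest ih =>
    intro cur words
    simp only [pvLoopA]
    split
    · rw [ih _ (words ++ [cur]), ih _ ([] ++ [cur])]
      simp
    · exact ih _ words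

lemma pvLoopA_join (rest : List Char) : ∀ cur,
    PySem.Chars.join [' '] (pvLoopA rest cur []) = cur ++ rest.flatMap pvMapB := by
  induction rest with
  | nil => intro cur; simp [pvLoopA, PySem.Chars.join_singleton]
  | cons c rest ih =>
    intro cur
    simp only [pvLoopA, List.flatMap_cons]
    by_cases h : PySem.Chars.isupper c
    · rw [if_pos h, pvLoopA_acc]
      obtain ⟨b, l, hbl⟩ : ∃ b l, pvLoopA rest [PySem.Chars.lowerChar c] [] = b :: l := by
        cases hO : pvLoopA rest [PySem.Chars.lowerChar c] [] with
        | nil => exact absurd hO (pvLoopA_ne_nil rest _ _)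
        | cons b l => exact ⟨b, l, rfl⟩
      rw [show [] ++ [cur] = [cur] from rfl, List.cons_append, List.nil_append, hbl,
        PySem.Chars.join_cons_cons, ← hbl, ih]
      simp [pvMapB, h]
    · rw [if_neg h, ih]
      simp [pvMapB, h]

-- ===== VERDICT (by name: the statement is the Claim_ definition above) =====
theorem to_space_delimited_lowercase_spec : Claim_equal_to_space_delimited_lowercase := by
  intro s _
  unfold Spec_to_space_delimited_lowercase to_space_delimited_lowercase to_space_delimited_lowercase_alt
  cases hs : s.toList with
  | nil => rfl
  | cons c rest =>
    dsimp only
    by_cases h : PySem.Chars.isupper c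
    · rw [if_pos h, if_neg (by simp [h]), pvLoopA_join, PySem.List.slice_from_one]
      simp [pvMapB, h]
    · rw [if_neg h, if_pos (by simp [h])]
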